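-- pv_equiv track=rewrite | github.com/thehalleyyoung/halley-labs | dp-mechanism-forge/dp_forge/lattice/enumeration.py | _zigzag_range
-- ===== SOURCE A (Python) =====
-- from typing import (
--     Callable,
--     Dict,
--     Iterator,
--     List,
--     Optional,
--     Sequence,
--     Tuple,
-- )
--
-- def _zigzag_range(center: int, lo: int, hi: int) -> Iterator[int]:
--     """Generate integers from lo to hi in zigzag order around center."""
--     center = max(lo, min(hi, center))
--     yield center
--     for delta in range(1, hi - lo + 1):
--         if center + delta <= hi:
--             yield center + delta
--         if center - delta >= lo:
--             yield center - delta
-- ===== SOURCE B (Python) =====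
-- def _zigzag_range(center, lo, hi):
--     """Generate integers from lo to hi in zigzag order around center."""
--     center = max(lo, min(hi, center))
--     yield center
--     rest = [x for x in range(lo, hi + 1) if x != center]
--     rest.sort(key=lambda x: 2 * abs(x - center) + (x < center))
--     yield from rest
-- ===== Notes on version B (the rewrite author's own statement) =====
-- stated objective: simpler
-- what changed: Replaces A's outward-expanding symmetric delta loop with building the list of remaining integers and sorting it once by distance from the clamped center (upper side first on ties).
import Mathlib
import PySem

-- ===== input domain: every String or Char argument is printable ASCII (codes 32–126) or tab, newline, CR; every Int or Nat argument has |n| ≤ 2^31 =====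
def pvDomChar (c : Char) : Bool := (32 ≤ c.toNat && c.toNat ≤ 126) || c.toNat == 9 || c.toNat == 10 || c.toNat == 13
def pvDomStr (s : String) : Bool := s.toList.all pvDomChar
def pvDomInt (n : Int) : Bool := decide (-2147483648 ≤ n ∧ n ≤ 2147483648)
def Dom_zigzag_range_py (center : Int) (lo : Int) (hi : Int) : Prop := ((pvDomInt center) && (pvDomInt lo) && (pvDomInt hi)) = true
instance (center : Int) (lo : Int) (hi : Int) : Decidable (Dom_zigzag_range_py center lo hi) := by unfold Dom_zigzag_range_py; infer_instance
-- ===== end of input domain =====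

-- B replaces A's outward-expanding symmetric delta loop by building the remaining
-- integers once and sorting them by distance from the clamped center (simpler, not faster).

-- ===== PORT A =====
-- for delta in range(1, hi-lo+1): if center+delta <= hi: yield …; if center-delta >= lo: yield …
def zigzag_range_py (center : Int) (lo : Int) (hi : Int) : List Int :=
  let c := max lo (min hi center)
  (PySem.List.pyRange 1 (hi - lo + 1) 1).foldl
    (fun acc delta =>
      let acc := if c + delta ≤ hi then acc ++ [c + delta] else acc
      if c - delta ≥ lo then acc ++ [c - delta] else acc)
    [c]

-- ===== PORT B =====
-- rest = [x for x in range(lo, hi+1) if x != center];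
-- rest.sort(key=lambda x: 2*abs(x-center) + (x < center))  — the Python bool adds as 0/1,
-- ported as 'if x < c then 1 else 0'; then center followed by the sorted rest.
def zigzag_range_py_alt (center : Int) (lo : Int) (hi : Int) : List Int :=
  let c := max lo (min hi center)
  let rest := (PySem.List.pyRange lo (hi + 1) 1).filter (fun x => decide (x ≠ c))
  c :: PySem.List.sorted rest (fun x => 2 * |x - c| + (if x < c then 1 else 0)) false

-- ===== PRECONDITION & SPEC =====
def Spec_zigzag_range_py (center : Int) (lo : Int) (hi : Int) (out : List Int) : Prop := out = zigzag_range_py_alt center lo hi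
instance (center : Int) (lo : Int) (hi : Int) (out : List Int) : Decidable (Spec_zigzag_range_py center lo hi out) := by unfold Spec_zigzag_range_py; infer_instance

-- ===== CLAIM (what is proved, stated in full; the proofs are below) =====
def Claim_equal_zigzag_range_py : Prop := ∀ (center : Int) (lo : Int) (hi : Int), Dom_zigzag_range_py center lo hi → Spec_zigzag_range_py center lo hi (zigzag_range_py center lo hi)

-- ===== LEMMAS AND PROOFS =====

-- B's sort key at the clamped center c
def zzKey (c x : Int) : Int := 2 * |x - c| + (if x < c then 1 else 0)

-- the pair of values A yields for one delta
def zzPiece (c lo hi delta : Int) : List Int :=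
  (if c + delta ≤ hi then [c + delta] else []) ++ (if c - delta ≥ lo then [c - delta] else [])

theorem zzKey_bounds (c lo hi delta : Int) (hd : 1 ≤ delta) :
    ∀ x ∈ zzPiece c lo hi delta, 2 * delta ≤ zzKey c x ∧ zzKey c x ≤ 2 * delta + 1 := by
  intro x hx
  unfold zzPiece at hx
  unfold zzKey
  rcases List.mem_append.1 hx with h | h <;> split_ifs at h <;>
    simp only [List.mem_singleton, List.not_mem_nil] at h <;> subst h
  · rw [abs_of_nonneg (by omega), if_neg (by omega)]; omega
  · rw [abs_of_neg (by omega), if_pos (by omega)]; omega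

theorem zzPiece_pairwise (c lo hi delta : Int) (hd : 1 ≤ delta) :
    (zzPiece c lo hi delta).Pairwise (fun a b => zzKey c a < zzKey c b) := by
  unfold zzPiece
  split_ifs <;> simp_all [zzKey]; split_ifs <;> omega

theorem mem_zzPiece (c lo hi delta x : Int) :
    x ∈ zzPiece c lo hi delta ↔
      ((x = c + delta ∧ x ≤ hi) ∨ (x = c - delta ∧ lo ≤ x)) := by
  unfold zzPiece
  constructor
  · intro hx
    rcases List.mem_append.1 hx with h | h <;> split_ifs at h <;>
      simp only [List.mem_singleton, List.not_mem_nil] at h <;> subst h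
    · exact Or.inl ⟨rfl, by omega⟩
    · exact Or.inr ⟨rfl, by omega⟩
  · rintro (⟨rfl, h⟩ | ⟨rfl, h⟩)
    · exact List.mem_append.2 (Or.inl (by rw [if_pos (by omega)]; simp))
    · exact List.mem_append.2 (Or.inr (by rw [if_pos (by omega)]; simp))

-- A's output list characterised as center followed by the flatMap of the pieces
theorem zigzag_range_py_eq (center lo hi : Int) :
    zigzag_range_py center lo hi =
      max lo (min hi center) ::
        (PySem.List.pyRange 1 (hi - lo + 1) 1).flatMap
          (zzPiece (max lo (min hi center)) lo hi) := by
  unfold zigzag_range_py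
  rw [PySem.List.foldl_congr_mem _ _
      (fun acc delta => acc ++ zzPiece (max lo (min hi center)) lo hi delta) _
      (by intro acc x _; unfold zzPiece; split_ifs <;> simp_all)]
  rw [PySem.List.foldl_append_eq_flatMap]
  rfl

-- the flatMap of the pieces is strictly increasing under the key
theorem flatMap_pairwise (c lo hi : Int) :
    ((PySem.List.pyRange 1 (hi - lo + 1) 1).flatMap (zzPiece c lo hi)).Pairwise
      (fun a b => zzKey c a < zzKey c b) := by
  rw [List.pairwise_flatMap]
  constructor
  · intro d hd
    exact zzPiece_pairwise c lo hi d (PySem.List.mem_pyRange_one.1 hd).1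
  · refine (PySem.List.pairwise_lt_pyRange_one 1 (hi - lo + 1)).imp_of_mem ?_
    intro d d' hd hd' hlt x hx y hy
    have h1 := zzKey_bounds c lo hi d (PySem.List.mem_pyRange_one.1 hd).1 x hx
    have h2 := zzKey_bounds c lo hi d' (PySem.List.mem_pyRange_one.1 hd').1 y hy
    omega

theorem flatMap_mem (c lo hi : Int) (hc : lo ≤ c ∧ c ≤ hi ∨ hi < lo) (x : Int) :
    x ∈ (PySem.List.pyRange 1 (hi - lo + 1) 1).flatMap (zzPiece c lo hi) ↔
      (lo ≤ x ∧ x ≤ hi ∧ x ≠ c) := by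
  rw [List.mem_flatMap]
  constructor
  · rintro ⟨d, hd, hx⟩
    have hdr := PySem.List.mem_pyRange_one.1 hd
    rcases (mem_zzPiece c lo hi d x).1 hx with ⟨rfl, h⟩ | ⟨rfl, h⟩ <;> omega
  · rintro ⟨h1, h2, h3⟩
    rcases lt_or_gt_of_ne h3 with h | h
    · exact ⟨c - x, PySem.List.mem_pyRange_one.2 (by omega),
        (mem_zzPiece c lo hi (c - x) x).2 (Or.inr ⟨by ring, h1⟩)⟩
    · exact ⟨x - c, PySem.List.mem_pyRange_one.2 (by omega),
        (mem_zzPiece c lo hi (x - c) x).2 (Or.inl ⟨by ring, h2⟩)⟩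

-- ===== VERDICT (by name: the statement is the Claim_ definition above) =====
theorem zigzag_range_py_spec : Claim_equal_zigzag_range_py := by
  intro center lo hi _
  unfold Spec_zigzag_range_py zigzag_range_py_alt
  rw [zigzag_range_py_eq]
  set c := max lo (min hi center) with hc
  refine congrArg (c :: ·) ?_
  symm
  apply PySem.List.sorted_eq_of_perm_of_pairwise_lt (key := zzKey c)
  · -- permutation
    have hnodL : ((PySem.List.pyRange 1 (hi - lo + 1) 1).flatMap (zzPiece c lo hi)).Nodup :=
      (flatMap_pairwise c lo hi).imp (fun h => fun he => absurd (congrArg (zzKey c) he) (by omega))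
    have hnodR : ((PySem.List.pyRange lo (hi + 1) 1).filter (fun x => decide (x ≠ c))).Nodup :=
      ((PySem.List.pairwise_lt_pyRange_one lo (hi + 1)).imp (fun h => by omega)).filter _
    rw [List.perm_ext_iff_of_nodup hnodL hnodR]
    intro x
    rw [flatMap_mem c lo hi (by omega), List.mem_filter, PySem.List.mem_pyRange_one]
    simp only [decide_eq_true_eq]
    omega
  · exact flatMap_pairwise c lo hi
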